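-- pv_equiv track=rewrite | github.com/SatyaKotla/dsa-to-ai-systems-engineering | core_dsa/algorithms/prefix_sum.py | subarray_sum_multiples_of_k
-- ===== SOURCE A (Python) =====
-- def subarray_sum_multiples_of_k(nums: list[int], k: int) -> bool:
--     prefix_sum = 0
--     seen = {0:-1} # remainder: first index where it appeared
--
--     for i, num in enumerate(nums):
--         prefix_sum = prefix_sum + num
--         remainder = prefix_sum % k if k!=0 else prefix_sum # to avoid zero division
--
--         if remainder in seen:
--             if i - seen[remainder] > 1:
--                 return True
--         else:
--             seen[remainder] = i
--     return False
-- ===== SOURCE B (Python) =====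
-- def subarray_sum_multiples_of_k(nums: list[int], k: int) -> bool:
--     n = len(nums)
--     for i in range(n):
--         s = nums[i]
--         for j in range(i + 1, n):
--             s += nums[j]
--             if (s == 0) if k == 0 else (s % k == 0):
--                 return True
--     return False
-- ===== Notes on version B (the rewrite author's own statement) =====
-- stated objective: alternative
-- what changed: Replaced the single-pass prefix-sum + first-occurrence-remainder hashmap with a direct nested brute-force scan over all start indices with a running sum; no dictionary and no prefix-remainder bookkeeping.
import Mathlib
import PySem

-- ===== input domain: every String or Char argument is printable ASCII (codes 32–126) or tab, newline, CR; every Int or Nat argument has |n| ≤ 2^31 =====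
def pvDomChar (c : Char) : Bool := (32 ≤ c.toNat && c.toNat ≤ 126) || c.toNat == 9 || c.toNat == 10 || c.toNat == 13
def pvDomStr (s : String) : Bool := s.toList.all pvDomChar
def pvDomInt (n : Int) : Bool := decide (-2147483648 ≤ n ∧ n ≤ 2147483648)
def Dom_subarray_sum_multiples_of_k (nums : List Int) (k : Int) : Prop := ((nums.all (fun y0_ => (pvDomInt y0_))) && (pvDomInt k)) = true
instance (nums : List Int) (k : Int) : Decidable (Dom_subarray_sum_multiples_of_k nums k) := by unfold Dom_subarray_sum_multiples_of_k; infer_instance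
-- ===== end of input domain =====

-- B replaces A's single-pass prefix-sum/remainder hashmap by a nested brute-force scan
-- (every start index, running sum): a genuinely different algorithm of similar size (alternative, not faster).

-- ===== PORT A =====
-- the loop 'for i, num in enumerate(nums)' with early return; state: prefix_sum, seen
def pvLoopA (k : Int) : List Int → Int → Int → PySem.Dict Int Int → Bool
  | [], _, _, _ => false
  | num :: rest, i, prefix_sum, seen =>
    let ps := prefix_sum + num
    let remainder := if k ≠ 0 then PySem.Int.mod ps k else ps
    match seen.get? remainder with
    | some j => if i - j > 1 then true else pvLoopA k rest (i + 1) ps seen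
    | none => pvLoopA k rest (i + 1) ps (seen.insert remainder i)

def subarray_sum_multiples_of_k (nums : List Int) (k : Int) : Bool :=
  pvLoopA k nums 0 0 (PySem.Dict.ofList [((0 : Int), (-1 : Int))])

-- ===== PORT B =====
-- inner loop 'for j in range(i+1, n): s += nums[j]; test' over the suffix after the start element
def pvInnerB (k : Int) (s : Int) : List Int → Bool
  | [] => false
  | x :: rest =>
    let s' := s + x
    if (if k = 0 then s' = 0 else PySem.Int.mod s' k = 0) then true else pvInnerB k s' rest

-- outer loop 'for i in range(n): s = nums[i]; …'
def pvOuterB (k : Int) : List Int → Bool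
  | [] => false
  | x :: rest => pvInnerB k x rest || pvOuterB k rest

def subarray_sum_multiples_of_k_alt (nums : List Int) (k : Int) : Bool :=
  pvOuterB k nums

-- ===== PRECONDITION & SPEC =====
def Spec_subarray_sum_multiples_of_k (nums : List Int) (k : Int) (out : Bool) : Prop := out = subarray_sum_multiples_of_k_alt nums k
instance (nums : List Int) (k : Int) (out : Bool) : Decidable (Spec_subarray_sum_multiples_of_k nums k out) := by unfold Spec_subarray_sum_multiples_of_k; infer_instance

-- ===== CLAIM (what is proved, stated in full; the proofs are below) =====
def Claim_equal_subarray_sum_multiples_of_k : Prop := ∀ (nums : List Int) (k : Int), Dom_subarray_sum_multiples_of_k nums k → Spec_subarray_sum_multiples_of_k nums k (subarray_sum_multiples_of_k nums k)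

-- ===== LEMMAS AND PROOFS =====

-- the remainder A stores: prefix_sum % k, or prefix_sum itself when k == 0
def pvRem (k x : Int) : Int := if k ≠ 0 then PySem.Int.mod x k else x

-- common characterisation: two prefix sums at distance ≥ 2 with equal remainder
def pvGood (k : Int) (l : List Int) : Prop :=
  ∃ t t' : ℕ, t + 2 ≤ t' ∧ t' ≤ l.length ∧ pvRem k ((l.take t).sum) = pvRem k ((l.take t').sum)

lemma pvRem_eq_iff (k x y : Int) : pvRem k x = pvRem k y ↔ k ∣ (y - x) := by
  unfold pvRem
  by_cases hk : k = 0
  · simp [hk, sub_eq_zero, eq_comm]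
  · simp only [hk, if_pos, ne_eq, not_false_iff]
    constructor
    · intro h
      have hx := PySem.Int.floordiv_mul_add_mod x k
      have hy := PySem.Int.floordiv_mul_add_mod y k
      have : y - x = k * (PySem.Int.floordiv y k - PySem.Int.floordiv x k) := by
        linear_combination hx - hy - h
      exact ⟨_, this⟩
    · rintro ⟨t, ht⟩
      have hy : y = x + k * t := by omega
      simp only [PySem.Int.mod, hy, Int.add_mul_fmod_self_left]

lemma pvTest_iff (k s : Int) : (if k = 0 then s = 0 else PySem.Int.mod s k = 0) ↔ k ∣ s := by
  by_cases hk : k = 0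
  · simp [hk, zero_dvd_iff]
  · simp [hk, PySem.Int.mod_eq_zero_iff_dvd]

lemma pvSum_take_succ (l : List Int) (n : ℕ) (h : n < l.length) :
    (l.take (n + 1)).sum = (l.take n).sum + l[n] := by
  rw [List.take_add, List.drop_eq_getElem_cons h, show (1:ℕ) = 0 + 1 from rfl,
    List.take_succ_cons, List.take_zero, List.sum_append, List.sum_cons, List.sum_nil, add_zero]

lemma pvInnerB_iff (k : Int) (l : List Int) : ∀ s : Int,
    pvInnerB k s l = true ↔ ∃ m : ℕ, 1 ≤ m ∧ m ≤ l.length ∧ k ∣ (s + (l.take m).sum) := by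
  induction l with
  | nil =>
    intro s
    simp only [pvInnerB, List.length_nil]
    constructor
    · intro h; cases h
    · rintro ⟨m, h1, h2, _⟩; omega
  | cons x rest ih =>
    intro s
    by_cases h : k ∣ (s + x)
    · constructor
      · intro _
        exact ⟨1, le_refl 1, by simp, by simpa using h⟩
      · intro _
        simp only [pvInnerB]
        rw [if_pos ((pvTest_iff k (s + x)).mpr h)]
    · simp only [pvInnerB]
      rw [if_neg (fun hc => h ((pvTest_iff k (s + x)).mp hc))]
      rw [ih (s + x)]
      constructor
      · rintro ⟨m, h1, h2, h3⟩
        refine ⟨m + 1, by omega, by simp only [List.length_cons]; omega, ?_⟩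
        rw [List.take_succ_cons, List.sum_cons, show s + (x + (rest.take m).sum) = s + x + (rest.take m).sum by ring]
        exact h3
      · rintro ⟨m, h1, h2, h3⟩
        obtain ⟨m', rfl⟩ : ∃ m', m = m' + 1 := ⟨m - 1, by omega⟩
        rw [List.take_succ_cons, List.sum_cons] at h3
        rcases Nat.eq_zero_or_pos m' with hm | hm
        · exact absurd (by simpa [hm] using h3) h
        · refine ⟨m', hm, by simp only [List.length_cons] at h2; omega, ?_⟩
          rw [show s + x + (rest.take m').sum = s + (x + (rest.take m').sum) by ring]
          exact h3

lemma pvOuterB_iff (k : Int) (l : List Int) :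
    pvOuterB k l = true ↔ ∃ a m : ℕ, 2 ≤ m ∧ a + m ≤ l.length ∧ k ∣ ((l.drop a).take m).sum := by
  induction l with
  | nil =>
    simp only [pvOuterB, List.length_nil]
    constructor
    · intro h; cases h
    · rintro ⟨a, m, h1, h2, _⟩; omega
  | cons x rest ih =>
    simp only [pvOuterB, Bool.or_eq_true, ih, pvInnerB_iff]
    constructor
    · rintro (⟨m, h1, h2, h3⟩ | ⟨a, m, h1, h2, h3⟩)
      · refine ⟨0, m + 1, by omega, by simp only [List.length_cons]; omega, ?_⟩
        simpa [List.take_succ_cons, List.sum_cons] using h3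
      · exact ⟨a + 1, m, h1, by simp only [List.length_cons]; omega, by simpa using h3⟩
    · rintro ⟨a, m, h1, h2, h3⟩
      cases a with
      | zero =>
        left
        obtain ⟨m', rfl⟩ : ∃ m', m = m' + 1 := ⟨m - 1, by omega⟩
        refine ⟨m', by omega, by simp only [List.length_cons] at h2; omega, ?_⟩
        simpa [List.take_succ_cons, List.sum_cons] using h3
      | succ a' =>
        right
        exact ⟨a', m, h1, by simp only [List.length_cons] at h2; omega, by simpa using h3⟩

lemma pvGood_iff_dvd (k : Int) (l : List Int) :
    pvGood k l ↔ ∃ a m : ℕ, 2 ≤ m ∧ a + m ≤ l.length ∧ k ∣ ((l.drop a).take m).sum := by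
  have key : ∀ a m : ℕ, (l.take (a + m)).sum = (l.take a).sum + ((l.drop a).take m).sum := by
    intro a m; rw [List.take_add, List.sum_append]
  constructor
  · rintro ⟨t, t', h1, h2, h3⟩
    refine ⟨t, t' - t, by omega, by omega, ?_⟩
    have hd := (pvRem_eq_iff k _ _).mp h3
    have := key t (t' - t)
    rw [show t + (t' - t) = t' by omega] at this
    have : (l.take t').sum - (l.take t).sum = ((l.drop t).take (t' - t)).sum := by omega
    rwa [this] at hd
  · rintro ⟨a, m, h1, h2, h3⟩
    refine ⟨a, a + m, by omega, h2, ?_⟩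
    rw [pvRem_eq_iff]
    have := key a m
    have heq : (l.take (a + m)).sum - (l.take a).sum = ((l.drop a).take m).sum := by omega
    rwa [heq]

lemma pvAlt_iff_good (k : Int) (l : List Int) :
    subarray_sum_multiples_of_k_alt l k = true ↔ pvGood k l := by
  rw [subarray_sum_multiples_of_k_alt, pvOuterB_iff, pvGood_iff_dvd]

lemma pvLoopA_iff (k : Int) (l : List Int) : ∀ (d n : ℕ) (seen : PySem.Dict Int Int),
    n + d = l.length →
    (∀ r j, seen.get? r = some j → ∃ t : ℕ, t ≤ n ∧ j = (t : Int) - 1 ∧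
        pvRem k ((l.take t).sum) = r ∧ ∀ t' < t, pvRem k ((l.take t').sum) ≠ r) →
    (∀ t ≤ n, (seen.get? (pvRem k ((l.take t).sum))).isSome) →
    (∀ t t' : ℕ, t + 2 ≤ t' → t' ≤ n → pvRem k ((l.take t).sum) ≠ pvRem k ((l.take t').sum)) →
    (pvLoopA k (l.drop n) (n : Int) ((l.take n).sum) seen = true ↔ pvGood k l) := by
  intro d
  induction d with
  | zero =>
    intro n seen hlen h1 h2 h3
    have hn : n = l.length := by omega
    rw [hn, List.drop_length]
    simp only [pvLoopA]
    constructor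
    · intro h; cases h
    · rintro ⟨t, t', ht, ht', heq⟩
      exact absurd heq (h3 t t' ht (by omega))
  | succ d ih =>
    intro n seen hlen h1 h2 h3
    have hn : n < l.length := by omega
    have hS := pvSum_take_succ l n hn
    rw [List.drop_eq_getElem_cons hn]
    simp only [pvLoopA]
    have hrw : (if k ≠ 0 then PySem.Int.mod ((l.take n).sum + l[n]) k else (l.take n).sum + l[n])
        = pvRem k ((l.take (n + 1)).sum) := by rw [← hS]; rfl
    rw [hrw]
    cases hget : seen.get? (pvRem k ((l.take (n + 1)).sum)) with
    | some j =>
      dsimp only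
      obtain ⟨t, htn, hj, hrt, hmin⟩ := h1 _ _ hget
      by_cases hgt : ((n : Int) - j > 1)
      · rw [if_pos hgt]
        constructor
        · intro _
          exact ⟨t, n + 1, by omega, by omega, hrt⟩
        · intro _; rfl
      · rw [if_neg hgt]
        have htn' : t = n := by omega
        have hmain := ih (n + 1) seen (by omega)
          (fun r0 j0 hg0 => by
            obtain ⟨t0, ht0, hj0, hr0, hm0⟩ := h1 r0 j0 hg0
            exact ⟨t0, by omega, hj0, hr0, hm0⟩)
          (fun t0 ht0 => by
            rcases Nat.lt_succ_iff_lt_or_eq.mp (Nat.lt_succ_of_le ht0) with h | h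
            · exact h2 t0 (by omega)
            · rw [h, hget]; rfl)
          (fun t0 t0' hlt hle heq => by
            rcases Nat.lt_or_ge t0' (n + 1) with h | h
            · exact h3 t0 t0' hlt (by omega) heq
            · have : t0' = n + 1 := by omega
              rw [this] at heq
              exact hmin t0 (by omega) heq)
        have hcast : (((n + 1 : ℕ)) : Int) = (n : Int) + 1 := by push_cast; ring
        rw [← hcast, ← hS]
        exact hmain
    | none =>
      dsimp only
      have hnone : ∀ t0 ≤ n, pvRem k ((l.take t0).sum) ≠ pvRem k ((l.take (n + 1)).sum) := by
        intro t0 ht0 heq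
        have := h2 t0 ht0
        rw [heq, hget] at this
        cases this
      have hmain := ih (n + 1) (seen.insert (pvRem k ((l.take (n + 1)).sum)) ((n : Int))) (by omega)
        (fun r0 j0 hg0 => by
          rw [PySem.Dict.get?_insert] at hg0
          by_cases hc : r0 = pvRem k ((l.take (n + 1)).sum)
          · rw [if_pos hc] at hg0
            refine ⟨n + 1, le_refl _, by injection hg0 with h; rw [← h]; push_cast; ring,
              hc.symm, fun t' ht' => by rw [hc]; exact hnone t' (by omega)⟩
          · rw [if_neg hc] at hg0
            obtain ⟨t0, ht0, hj0, hr0, hm0⟩ := h1 r0 j0 hg0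
            exact ⟨t0, by omega, hj0, hr0, hm0⟩)
        (fun t0 ht0 => by
          rw [PySem.Dict.get?_insert]
          by_cases hc : pvRem k ((l.take t0).sum) = pvRem k ((l.take (n + 1)).sum)
          · rw [if_pos hc]; rfl
          · rw [if_neg hc]
            have ht0' : t0 ≤ n := by
              rcases Nat.lt_or_ge t0 (n + 1) with h | h
              · omega
              · exact absurd (by rw [show t0 = n + 1 by omega]) hc
            exact h2 t0 ht0')
        (fun t0 t0' hlt hle heq => by
          rcases Nat.lt_or_ge t0' (n + 1) with h | h
          · exact h3 t0 t0' hlt (by omega) heq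
          · have : t0' = n + 1 := by omega
            rw [this] at heq
            exact hnone t0 (by omega) heq)
      have hcast : (((n + 1 : ℕ)) : Int) = (n : Int) + 1 := by push_cast; ring
      rw [← hcast, ← hS]
      exact hmain

lemma pvA_iff_good (k : Int) (l : List Int) :
    subarray_sum_multiples_of_k l k = true ↔ pvGood k l := by
  have hrem0 : pvRem k 0 = 0 := by
    unfold pvRem
    by_cases hk : k = 0
    · simp [hk]
    · simp [hk, PySem.Int.mod, Int.zero_fmod]
  have h0 := pvLoopA_iff k l l.length 0 (PySem.Dict.ofList [((0 : Int), (-1 : Int))])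
    (by omega)
    (fun r j hg => by
      rw [show PySem.Dict.ofList [((0 : Int), (-1 : Int))] = PySem.Dict.mk [((0 : Int), (-1 : Int))] from rfl,
        PySem.Dict.get?_mk_cons] at hg
      by_cases hr : (0 : Int) = r
      · simp only [hr, beq_self_eq_true, if_true] at hg
        refine ⟨0, le_refl _, by injection hg with h; omega, ?_, fun t' ht' => by omega⟩
        simpa [hrem0] using hr
      · rw [if_neg (by simpa using hr)] at hg
        simp [PySem.Dict.get?] at hg)
    (fun t ht => by
      have ht0 : t = 0 := by omega
      rw [ht0]
      simp only [List.take_zero, List.sum_nil, hrem0]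
      rfl)
    (fun t t' h1 h2 => by omega)
  simpa using h0

-- ===== VERDICT (by name: the statement is the Claim_ definition above) =====
theorem subarray_sum_multiples_of_k_spec : Claim_equal_subarray_sum_multiples_of_k := by
  intro nums k _
  unfold Spec_subarray_sum_multiples_of_k
  have hA := pvA_iff_good k nums
  have hB := pvAlt_iff_good k nums
  cases hA' : subarray_sum_multiples_of_k nums k
  · cases hB' : subarray_sum_multiples_of_k_alt nums k
    · rfl
    · exact absurd (hA.mpr (hB.mp hB')) (by simp [hA'])
  · exact (hB.mpr (hA.mp hA')).symm
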